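-- pv_equiv track=rewrite | github.com/picografix/pythonProjects | profRunning.py | subseq
-- ===== SOURCE A (Python) =====
-- def sumof(li):
--     sum=0
--     for i in li:
--         sum += i
--     return sum
--
-- def subseq(li,a):
--     count = 0
--     if sumof(li)%2==1:
--         return -1
--     else:
--         for i in range(a):
--             if sumof(li[0:i])%2 ==0:
--                 count +=1
--                 li = li[i:]
--             else:
--                 continue
--         return count
-- ===== SOURCE B (Python) =====
-- def subseq(li, a):
--     if sum(li) % 2 == 1:
--         return -1
--     n = len(li)
--     # parity prefix: P[k] = parity of sum of first k elements of the ORIGINAL list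
--     P = [0]
--     p = 0
--     for x in li:
--         p = (p + x) % 2
--         P.append(p)
--     # A's repeated "li = li[i:]" only advances a start offset; track it as pos.
--     pos = 0
--     count = 0
--     for i in range(min(a, n)):
--         if P[min(pos + i, n)] == P[pos]:
--             count += 1
--             pos = min(pos + i, n)
--     # for i >= n the inspected prefix is the whole remaining list; its parity is
--     # P[pos] (total is even), constant from here on
--     if a > n:
--         if P[pos] == 0:
--             count += a - n
--     return count
-- ===== Notes on version B (the rewrite author's own statement) =====
-- stated objective: faster
-- what changed: B precomputes a prefix-parity table once and tracks A's repeated 'li = li[i:]' re-slicing as a single integer offset, deciding all iterations i >= len(li) in closed form, instead of re-summing a slice on every iteration.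
import Mathlib
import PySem

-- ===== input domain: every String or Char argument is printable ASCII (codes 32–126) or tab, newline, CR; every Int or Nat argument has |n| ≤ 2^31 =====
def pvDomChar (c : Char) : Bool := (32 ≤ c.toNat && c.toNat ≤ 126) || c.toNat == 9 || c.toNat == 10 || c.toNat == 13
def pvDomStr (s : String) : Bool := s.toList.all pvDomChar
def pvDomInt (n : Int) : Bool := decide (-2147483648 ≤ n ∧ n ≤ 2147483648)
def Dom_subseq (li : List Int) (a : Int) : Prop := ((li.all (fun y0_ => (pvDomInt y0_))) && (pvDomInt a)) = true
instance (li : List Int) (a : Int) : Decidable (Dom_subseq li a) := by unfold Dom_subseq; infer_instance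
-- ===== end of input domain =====

-- B replaces A's per-iteration slice re-summing by a precomputed prefix-parity table and an
-- integer offset, with the iterations past len(li) resolved in closed form (objective: faster).


-- ===== PORT A =====
def sumof (li : List Int) : Int := li.foldl (fun s i => s + i) 0
def subseq (li : List Int) (a : Int) : Int :=
  if PySem.Int.mod (sumof li) 2 == 1 then -1
  else
    ((PySem.List.pyRange 0 a 1).foldl
      (fun (st : Int × List Int) i =>
        if PySem.Int.mod (sumof (PySem.List.slice st.2 (some 0) (some i))) 2 == 0 then
          (st.1 + 1, PySem.List.slice st.2 (some i) none)
        else st)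
      (0, li)).1

-- ===== PORT B =====
-- P is indexed only at positions in [0, len li]; pyGetD is exact there.
def subseq_alt (li : List Int) (a : Int) : Int :=
  if PySem.Int.mod li.sum 2 == 1 then -1
  else
    let n : Int := PySem.List.len li
    let Pp := li.foldl (fun (s : List Int × Int) x =>
        let p := PySem.Int.mod (s.2 + x) 2
        (s.1 ++ [p], p)) ([0], 0)
    let P := Pp.1
    let cp := (PySem.List.pyRange 0 (min a n) 1).foldl
      (fun (s : Int × Int) i =>
        if PySem.List.pyGetD P (min (s.2 + i) n) 0 == PySem.List.pyGetD P s.2 0 then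
          (s.1 + 1, min (s.2 + i) n)
        else s) ((0 : Int), (0 : Int))
    if a > n then
      (if PySem.List.pyGetD P cp.2 0 == 0 then cp.1 + (a - n) else cp.1)
    else cp.1

-- ===== PRECONDITION & SPEC =====
def Spec_subseq (li : List Int) (a : Int) (out : Int) : Prop := out = subseq_alt li a
instance (li : List Int) (a : Int) (out : Int) : Decidable (Spec_subseq li a out) := by unfold Spec_subseq; infer_instance

-- ===== CLAIM (what is proved, stated in full; the proofs are below) =====
def Claim_equal_subseq : Prop := ∀ (li : List Int) (a : Int), Dom_subseq li a → Spec_subseq li a (subseq li a)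

-- ===== LEMMAS AND PROOFS =====
def parP (li : List Int) : List Int := (List.range (li.length+1)).map fun k => (li.take k).sum % 2
def stepA (st : Int × List Int) (i : Int) : Int × List Int :=
  if PySem.Int.mod (sumof (PySem.List.slice st.2 (some 0) (some i))) 2 == 0 then
    (st.1 + 1, PySem.List.slice st.2 (some i) none)
  else st
def stepB (li : List Int) (s : Int × Int) (i : Int) : Int × Int :=
  if PySem.List.pyGetD (parP li) (min (s.2 + i) ((li.length:Int))) 0 == PySem.List.pyGetD (parP li) s.2 0 then
    (s.1 + 1, min (s.2 + i) ((li.length:Int)))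
  else s

theorem sumof_sum (li : List Int) : sumof li = li.sum := by
  simp [sumof, List.sum_eq_foldl]

theorem take_min (li : List Int) (k : Nat) : li.take k = li.take (min k li.length) := by
  rcases le_total k li.length with h | h
  · simp [Nat.min_eq_left h]
  · simp [Nat.min_eq_right h, List.take_of_length_le h]

theorem drop_min (li : List Int) (k : Nat) : li.drop k = li.drop (min k li.length) := by
  rcases le_total k li.length with h | h
  · simp [Nat.min_eq_left h]
  · simp [Nat.min_eq_right h, List.drop_eq_nil_of_le h]

theorem parP_get (li : List Int) (k : Nat) (h : k ≤ li.length) :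
    PySem.List.pyGetD (parP li) ((k:Int)) 0 = (li.take k).sum % 2 := by
  rw [PySem.List.pyGetD_natCast]
  unfold parP
  rw [List.getD_eq_getElem?_getD, List.getElem?_map, List.getElem?_range (by omega)]
  simp

theorem sum_take_drop (li : List Int) (pos : Nat) (m : Nat) :
    ((li.drop pos).take m).sum
      = (li.take (min (pos + m) li.length)).sum - (li.take pos).sum := by
  rw [← take_min]
  have h1 : li.take (pos + m) = li.take pos ++ (li.drop pos).take m := List.take_add ..
  rw [h1, List.sum_append]; ring

theorem cond_eq (li : List Int) (pos : Nat) (hpos : pos ≤ li.length) (i : Int) (hi : 0 ≤ i) :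
    (PySem.Int.mod (sumof (PySem.List.slice (li.drop pos) (some 0) (some i))) 2 == 0)
    = (PySem.List.pyGetD (parP li) (min ((pos:Int) + i) ((li.length:Int))) 0
        == PySem.List.pyGetD (parP li) (pos:Int) 0) := by
  have hmin : min ((pos:Int) + i) ((li.length:Int)) = ((min (pos + i.toNat) li.length : Nat) : Int) := by
    omega
  rw [hmin, parP_get li _ (by omega), parP_get li pos hpos]
  simp only [PySem.List.slice_zero_start, PySem.List.slice_to _ hi, sumof_sum,
    PySem.Int.mod_eq_emod_of_pos (by norm_num : (0:Int) < 2)]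
  rw [sum_take_drop]
  rw [Bool.eq_iff_iff]
  simp only [beq_iff_eq]
  omega

theorem head_inv (li : List Int) (L : List Int) (hL : ∀ i ∈ L, 0 ≤ i) :
    ∀ (c : Int) (pos : Nat), pos ≤ li.length →
    ∃ pos' : Nat, pos' ≤ li.length ∧
      (L.foldl (stepB li) (c, (pos:Int))) = ((L.foldl stepA (c, li.drop pos)).1, (pos':Int)) ∧
      (L.foldl stepA (c, li.drop pos)).2 = li.drop pos' := by
  induction L with
  | nil => exact fun c pos h => ⟨pos, h, rfl, rfl⟩
  | cons i L ih =>
    intro c pos hpos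
    have hi : 0 ≤ i := hL i (List.mem_cons_self ..)
    have hL' : ∀ j ∈ L, 0 ≤ j := fun j hj => hL j (List.mem_cons_of_mem _ hj)
    simp only [List.foldl_cons]
    have hcond := cond_eq li pos hpos i hi
    have hmin : min ((pos:Int) + i) ((li.length:Int)) = ((min (pos + i.toNat) li.length : Nat) : Int) := by
      omega
    have hdrop : PySem.List.slice (li.drop pos) (some i) none = li.drop (min (pos + i.toNat) li.length) := by
      rw [PySem.List.slice_from _ hi, List.drop_drop, Nat.add_comm, ← drop_min]
    by_cases hc : (PySem.Int.mod (sumof (PySem.List.slice (li.drop pos) (some 0) (some i))) 2 == 0) = true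
    · have hcB : (PySem.List.pyGetD (parP li) (min ((pos:Int) + i) ((li.length:Int))) 0
          == PySem.List.pyGetD (parP li) (pos:Int) 0) = true := by rw [← hcond]; exact hc
      rw [show stepA (c, li.drop pos) i = (c + 1, li.drop (min (pos + i.toNat) li.length)) by
            simp only [stepA]; rw [if_pos hc, hdrop],
          show stepB li (c, (pos:Int)) i = (c + 1, ((min (pos + i.toNat) li.length : Nat) : Int)) by
            simp only [stepB]; rw [if_pos hcB, hmin]]
      exact ih hL' (c+1) _ (by omega)
    · have hcB : ¬ ((PySem.List.pyGetD (parP li) (min ((pos:Int) + i) ((li.length:Int))) 0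
          == PySem.List.pyGetD (parP li) (pos:Int) 0) = true) := by rw [← hcond]; exact hc
      rw [show stepA (c, li.drop pos) i = (c, li.drop pos) by simp only [stepA]; rw [if_neg hc],
          show stepB li (c, (pos:Int)) i = (c, (pos:Int)) by simp only [stepB]; rw [if_neg hcB]]
      exact ih hL' c pos hpos

theorem tailA (L : List Int) :
    ∀ (c : Int) (l : List Int), (∀ i ∈ L, 0 ≤ i ∧ (l.length:Int) ≤ i) →
    (L.foldl stepA (c, l)).1 = c + (if l.sum % 2 = 0 then (L.length:Int) else 0) := by
  induction L with
  | nil => intro c l h; simp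
  | cons i L ih =>
    intro c l h
    obtain ⟨hi0, hil⟩ := h i (List.mem_cons_self ..)
    simp only [List.foldl_cons]
    have hslice : PySem.List.slice l (some 0) (some i) = l := by
      simp only [PySem.List.slice_zero_start, PySem.List.slice_to _ hi0]
      exact List.take_of_length_le (by omega)
    have hmod : PySem.Int.mod (sumof l) 2 = l.sum % 2 := by
      rw [sumof_sum, PySem.Int.mod_eq_emod_of_pos (by norm_num : (0:Int) < 2)]
    by_cases hp : l.sum % 2 = 0
    · have hc : (PySem.Int.mod (sumof (PySem.List.slice l (some 0) (some i))) 2 == 0) = true := by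
        rw [hslice, hmod]; simp [hp]
      have hnil : PySem.List.slice l (some i) none = ([] : List Int) := by
        rw [PySem.List.slice_from _ hi0]
        exact List.drop_eq_nil_of_le (by omega)
      rw [show stepA (c, l) i = (c + 1, []) by simp only [stepA]; rw [if_pos hc, hnil]]
      rw [ih (c+1) [] (fun j hj => ⟨(h j (List.mem_cons_of_mem _ hj)).1,
          by simpa using (h j (List.mem_cons_of_mem _ hj)).1⟩)]
      simp [hp]; ring
    · have hc : ¬ ((PySem.Int.mod (sumof (PySem.List.slice l (some 0) (some i))) 2 == 0) = true) := by
        rw [hslice, hmod]; simp [hp]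
      rw [show stepA (c, l) i = (c, l) by simp only [stepA]; rw [if_neg hc]]
      rw [ih c l (fun j hj => h j (List.mem_cons_of_mem _ hj))]
      simp [hp]

theorem parP_append (l : List Int) (x : Int) :
    parP (l ++ [x]) = parP l ++ [(l.sum + x) % 2] := by
  unfold parP
  rw [show (l ++ [x]).length = l.length + 1 by simp, List.range_succ, List.map_append]
  congr 1
  · apply List.map_congr_left; intro k hk; simp only [List.mem_range] at hk
    rw [List.take_append_of_le_length (by omega)]
  · simp [List.take_of_length_le (by simp : (l++[x]).length ≤ l.length+1)]

theorem foldP_eq (li : List Int) :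
    li.foldl (fun (s : List Int × Int) x =>
        let p := PySem.Int.mod (s.2 + x) 2
        (s.1 ++ [p], p)) ([0], 0) = (parP li, li.sum % 2) := by
  induction li using List.reverseRecOn with
  | nil => simp [parP]
  | append_singleton l x ih =>
      rw [List.foldl_append, ih]
      simp only [List.foldl_cons, List.foldl_nil]
      rw [PySem.Int.mod_eq_emod_of_pos (by norm_num)]
      rw [parP_append]
      refine Prod.ext ?_ ?_ <;> simp [Int.emod_add_emod]

theorem subseq_eq_alt : ∀ (li : List Int) (a : Int), subseq li a = subseq_alt li a := by
  intro li a
  unfold subseq subseq_alt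
  rw [sumof_sum]
  simp only [foldP_eq, PySem.List.len_eq]
  by_cases hodd : (PySem.Int.mod li.sum 2 == 1) = true
  · rw [if_pos hodd, if_pos hodd]
  · rw [if_neg hodd, if_neg hodd]
    have heven : li.sum % 2 = 0 := by
      rw [PySem.Int.mod_eq_emod_of_pos (by norm_num : (0:Int) < 2)] at hodd
      simp only [beq_iff_eq] at hodd; omega
    have eA : (fun (st : Int × List Int) i =>
        if PySem.Int.mod (sumof (PySem.List.slice st.2 (some 0) (some i))) 2 == 0 then
          (st.1 + 1, PySem.List.slice st.2 (some i) none)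
        else st) = stepA := rfl
    have eB : (fun (s : Int × Int) i =>
        if PySem.List.pyGetD (parP li) (min (s.2 + i) ((li.length:Int))) 0
            == PySem.List.pyGetD (parP li) s.2 0 then
          (s.1 + 1, min (s.2 + i) ((li.length:Int)))
        else s) = stepB li := rfl
    rw [eA, eB]
    by_cases hle : a ≤ (li.length : Int)
    · rw [if_neg (by omega), Int.min_eq_left hle]
      obtain ⟨pos', h1, h2, h3⟩ := head_inv li (PySem.List.pyRange 0 a 1)
        (fun i hi => (PySem.List.mem_pyRange_one.mp hi).1) 0 0 (Nat.zero_le _)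
      simp only [Nat.cast_zero, List.drop_zero] at h2
      rw [h2]
    · rw [if_pos (by omega), Int.min_eq_right (by omega)]
      have hlen0 : (0:Int) ≤ (li.length:Int) := by positivity
      rw [PySem.List.pyRange_one_append 0 (li.length:Int) a hlen0 (by omega), List.foldl_append]
      obtain ⟨pos', h1, h2, h3⟩ := head_inv li (PySem.List.pyRange 0 (li.length:Int) 1)
        (fun i hi => (PySem.List.mem_pyRange_one.mp hi).1) 0 0 (Nat.zero_le _)
      simp only [Nat.cast_zero, List.drop_zero] at h2 h3
      rw [h2]
      have hA := tailA (PySem.List.pyRange (li.length:Int) a 1)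
        ((List.foldl stepA (0, li) (PySem.List.pyRange 0 (li.length:Int) 1)).1)
        (List.foldl stepA (0, li) (PySem.List.pyRange 0 (li.length:Int) 1)).2
        (fun i hi => by
          obtain ⟨hi1, hi2⟩ := PySem.List.mem_pyRange_one.mp hi
          constructor
          · omega
          · rw [h3]; simp only [List.length_drop]; omega)
      rw [show ((List.foldl stepA (0, li) (PySem.List.pyRange 0 (li.length:Int) 1)).1,
            (List.foldl stepA (0, li) (PySem.List.pyRange 0 (li.length:Int) 1)).2)
          = List.foldl stepA (0, li) (PySem.List.pyRange 0 (li.length:Int) 1) from rfl] at hA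
      rw [hA, h3]
      have hsum : (li.take pos').sum + (li.drop pos').sum = li.sum := by
        rw [← List.sum_append, List.take_append_drop]
      rw [parP_get li pos' h1, PySem.List.length_pyRange_one]
      have hcast : (((a - (li.length:Int)).toNat : Nat) : Int) = a - (li.length:Int) := by omega
      by_cases hp : (li.take pos').sum % 2 = 0
      · rw [if_pos (show (li.drop pos' : List Int).sum % 2 = 0 by omega), if_pos (by simp [hp]), hcast]
      · rw [if_neg (show ¬ (li.drop pos' : List Int).sum % 2 = 0 by omega), if_neg (by simp [hp]), add_zero]

-- ===== VERDICT (by name: the statement is the Claim_ definition above) =====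
theorem subseq_spec : Claim_equal_subseq := by
  intro li a _
  unfold Spec_subseq
  exact subseq_eq_alt li a
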